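-- pv_equiv track=rewrite | github.com/xadupre/yet-another-onnx-builder | yobx/helpers/_gallery_helper.py | _split_comment_code
-- ===== SOURCE A (Python) =====
-- from typing import List, Tuple
--
-- def _split_comment_code(lines: List[str]) -> Tuple[List[str], List[str]]:
--     """
--     Split *lines* into a leading comment block and a trailing code block.
--
--     Lines that start with ``#`` (after stripping leading spaces) belong to
--     the comment block.  The first non-comment, non-blank line (or a blank
--     line not followed by another comment line) ends the comment block.
--
--     Comment lines have the leading ``# `` (or just ``#``) stripped.
--     """
--     # Find the boundary: leading run of comment/blank lines followed by the
--     # first line that is neither a comment nor blank.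
--     comment_lines: List[str] = []
--     code_lines: List[str] = []
--
--     # Collect the leading comment block
--     j = 0
--     while j < len(lines):
--         raw = lines[j]
--         stripped = raw.strip()
--         if stripped.startswith("#"):
--             # Comment line: strip leading "# " or "#"
--             comment_lines.append(_strip_comment_marker(raw))
--             j += 1
--         elif not stripped:
--             # Blank line: look ahead to decide whether we're still in the
--             # comment block (next non-blank line is a comment) or in code.
--             lookahead = j + 1
--             while lookahead < len(lines) and not lines[lookahead].strip():
--                 lookahead += 1
--             if lookahead < len(lines) and lines[lookahead].strip().startswith("#"):
--                 comment_lines.append("")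
--                 j += 1
--             else:
--                 break
--         else:
--             break
--
--     code_lines = lines[j:]
--     return comment_lines, code_lines
--
-- def _strip_comment_marker(line: str) -> str:
--     """Strip the ``#`` comment marker (and one optional space) from a line."""
--     stripped = line.lstrip()
--     if stripped.startswith("# "):
--         return line[: len(line) - len(stripped)] + stripped[2:]
--     if stripped.startswith("#"):
--         return line[: len(line) - len(stripped)] + stripped[1:]
--     return line
-- ===== SOURCE B (Python) =====
-- from typing import List, Tuple
--
-- def _split_comment_code(lines: List[str]) -> Tuple[List[str], List[str]]:
--     """Single pass: buffer consecutive blank lines and decide their fate when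
--     the next non-blank line (or the end) is reached."""
--     comments: List[str] = []
--     buf: List[str] = []  # pending blank lines, not yet assigned
--     for i, raw in enumerate(lines):
--         stripped = raw.strip()
--         if stripped.startswith("#"):
--             comments += [""] * len(buf)
--             buf = []
--             comments.append(_strip_comment_marker(raw))
--         elif not stripped:
--             buf.append(raw)
--         else:
--             return comments, buf + lines[i:]
--     return comments, buf
--
-- def _strip_comment_marker(line: str) -> str:
--     """Strip the ``#`` comment marker (and one optional space) from a line."""
--     stripped = line.lstrip()
--     if stripped.startswith("# "):
--         return line[: len(line) - len(stripped)] + stripped[2:]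
--     if stripped.startswith("#"):
--         return line[: len(line) - len(stripped)] + stripped[1:]
--     return line
-- ===== Notes on version B (the rewrite author's own statement) =====
-- stated objective: alternative
-- what changed: Replaced A's nested lookahead scan over blank-line runs (re-scanned once per blank line) by a single forward pass that buffers consecutive blank lines and assigns the whole buffer when the next non-blank line (or the end) is seen.
import Mathlib
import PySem

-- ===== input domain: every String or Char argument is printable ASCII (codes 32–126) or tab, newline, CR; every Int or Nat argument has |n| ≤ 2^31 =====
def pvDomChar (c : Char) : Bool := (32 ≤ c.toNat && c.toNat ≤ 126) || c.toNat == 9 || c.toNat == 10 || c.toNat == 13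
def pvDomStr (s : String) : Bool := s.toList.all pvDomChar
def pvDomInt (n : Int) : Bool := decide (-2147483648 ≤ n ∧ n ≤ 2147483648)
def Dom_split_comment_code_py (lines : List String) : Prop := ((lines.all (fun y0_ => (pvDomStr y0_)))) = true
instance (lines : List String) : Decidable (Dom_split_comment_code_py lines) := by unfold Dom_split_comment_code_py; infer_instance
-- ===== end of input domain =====

-- B replaces A's per-blank-line lookahead re-scan by a single forward pass that buffers
-- consecutive blank lines and decides the whole buffer at the next non-blank line (objective: alternative).

-- ===== PORT A =====
-- _strip_comment_marker (shared same-module helper, used verbatim by both Pythons)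
def pvStripMarker (line : String) : String :=
  let stripped := PySem.Str.lstrip line
  if PySem.Str.startswith stripped "# " then
    PySem.Str.slice line none (some ((PySem.Str.len line : Int) - (PySem.Str.len stripped : Int)))
      ++ PySem.Str.slice stripped (some 2) none
  else if PySem.Str.startswith stripped "#" then
    PySem.Str.slice line none (some ((PySem.Str.len line : Int) - (PySem.Str.len stripped : Int)))
      ++ PySem.Str.slice stripped (some 1) none
  else line

-- the inner 'while lookahead < len(lines) and not lines[lookahead].strip()' scan:
-- returns the first line of the suffix whose strip() is non-empty (none = ran off the end)
def pvLookahead : List String → Option String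
  | [] => none
  | l :: tl => if PySem.Str.strip l = "" then pvLookahead tl else some l

-- the outer 'while j < len(lines)' loop, over the suffix lines[j:]
def pvALoop : List String → List String → List String × List String
  | [], comments => (comments, [])
  | raw :: tl, comments =>
    let stripped := PySem.Str.strip raw
    if PySem.Str.startswith stripped "#" then
      pvALoop tl (comments ++ [pvStripMarker raw])
    else if stripped = "" then
      match pvLookahead tl with
      | some nb =>
        if PySem.Str.startswith (PySem.Str.strip nb) "#" then pvALoop tl (comments ++ [""])
        else (comments, raw :: tl)
      | none => (comments, raw :: tl)
    else (comments, raw :: tl)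

def split_comment_code_py (lines : List String) : List String × List String :=
  pvALoop lines []

-- ===== PORT B =====
-- single pass; buf holds the pending blank lines not yet assigned to either side
def pvBLoop : List String → List String → List String → List String × List String
  | [], comments, buf => (comments, buf)
  | raw :: tl, comments, buf =>
    let stripped := PySem.Str.strip raw
    if PySem.Str.startswith stripped "#" then
      pvBLoop tl (comments ++ List.replicate buf.length "" ++ [pvStripMarker raw]) []
    else if stripped = "" then
      pvBLoop tl comments (buf ++ [raw])
    else (comments, buf ++ (raw :: tl))

def split_comment_code_py_alt (lines : List String) : List String × List String :=
  pvBLoop lines [] []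

-- ===== PRECONDITION & SPEC =====
def Spec_split_comment_code_py (lines : List String) (out : List String × List String) : Prop := out = split_comment_code_py_alt lines
instance (lines : List String) (out : List String × List String) : Decidable (Spec_split_comment_code_py lines out) := by unfold Spec_split_comment_code_py; infer_instance

-- ===== CLAIM (what is proved, stated in full; the proofs are below) =====
def Claim_equal_split_comment_code_py : Prop := ∀ (lines : List String), Dom_split_comment_code_py lines → Spec_split_comment_code_py lines (split_comment_code_py lines)

-- ===== LEMMAS AND PROOFS =====

theorem startswith_nil_hash : PySem.Chars.startswith [] ['#'] = false := by decide

-- bridge: a blank line at the Chars level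
theorem blank_toList {r : String} (h : PySem.Str.strip r = "") :
    PySem.Chars.strip r.toList = [] := by
  have := congrArg String.toList h
  simpa using this

-- a line whose strip() starts with '#' is not blank
theorem hash_not_blank {r : String}
    (h : PySem.Chars.startswith (PySem.Chars.strip r.toList) ['#'] = true) :
    ¬ PySem.Str.strip r = "" := by
  intro hc
  rw [blank_toList hc] at h
  exact absurd h (by decide)

theorem lookahead_append_blank {buf : List String} (rest : List String)
    (hb : ∀ x ∈ buf, PySem.Str.strip x = "") :
    pvLookahead (buf ++ rest) = pvLookahead rest := by
  induction buf with
  | nil => rfl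
  | cons b tl ih =>
    have hbb := hb b (by simp)
    simp only [List.cons_append, pvLookahead, hbb, if_pos]
    exact ih (fun x hx => hb x (by simp [hx]))

-- A's loop on a blank prefix: characterised by the first non-blank line of the remainder
theorem aLoop_blank_prefix (buf rest comments : List String)
    (hb : ∀ x ∈ buf, PySem.Str.strip x = "") :
    pvALoop (buf ++ rest) comments =
      match pvLookahead rest with
      | some nb =>
        if PySem.Chars.startswith (PySem.Chars.strip nb.toList) ['#'] = true then
          pvALoop rest (comments ++ List.replicate buf.length "")
        else (comments, buf ++ rest)
      | none => (comments, buf ++ rest) := by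
  induction buf generalizing comments with
  | nil =>
    simp only [List.nil_append, List.length_nil, List.replicate, List.append_nil]
    match rest with
    | [] => rfl
    | r :: tl =>
      by_cases hc : PySem.Chars.startswith (PySem.Chars.strip r.toList) ['#'] = true
      · have hne : ¬ PySem.Str.strip r = "" := hash_not_blank hc
        simp [pvLookahead, hne, hc]
      · by_cases hblank : PySem.Str.strip r = ""
        · have hbC := blank_toList hblank
          simp only [pvLookahead, hblank, if_pos]
          simp only [pvALoop, hbC, hblank, if_pos]
          match h : pvLookahead tl with
          | none => simp [hbC, startswith_nil_hash]
          | some nb =>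
            by_cases hc2 : PySem.Chars.startswith (PySem.Chars.strip nb.toList) ['#'] = true
            · simp [hbC, hc2, startswith_nil_hash]
            · simp [hbC, hc2, startswith_nil_hash]
        · simp only [pvLookahead, hblank, if_neg hblank]
          simp [pvALoop, hc, hblank]
  | cons b buf' ih =>
    have hbb := hb b (by simp)
    have hbC := blank_toList hbb
    have hb' : ∀ x ∈ buf', PySem.Str.strip x = "" := fun x hx => hb x (by simp [hx])
    simp only [List.cons_append, pvALoop, hbC, hbb, if_pos]
    rw [lookahead_append_blank rest hb']
    match h : pvLookahead rest with
    | none => simp [hbC, startswith_nil_hash]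
    | some nb =>
      by_cases hc2 : PySem.Chars.startswith (PySem.Chars.strip nb.toList) ['#'] = true
      · simp only [hbC, hc2]
        have := ih (comments ++ [""]) hb'
        rw [h] at this
        simp only [hc2, if_pos] at this
        simp [this, hc2, startswith_nil_hash, List.replicate_succ, List.append_assoc]
      · simp [hbC, hc2, startswith_nil_hash]

theorem bLoop_eq_aLoop (rest : List String) :
    ∀ comments buf, (∀ x ∈ buf, PySem.Str.strip x = "") →
    pvBLoop rest comments buf = pvALoop (buf ++ rest) comments := by
  induction rest with
  | nil =>
    intro comments buf hb
    rw [aLoop_blank_prefix buf [] comments hb]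
    simp [pvBLoop, pvLookahead]
  | cons raw tl ih =>
    intro comments buf hb
    rw [aLoop_blank_prefix buf (raw :: tl) comments hb]
    by_cases hc : PySem.Chars.startswith (PySem.Chars.strip raw.toList) ['#'] = true
    · have hne : ¬ PySem.Str.strip raw = "" := hash_not_blank hc
      simp only [pvLookahead, hne, if_neg hne]
      rw [show pvBLoop (raw :: tl) comments buf =
            pvBLoop tl (comments ++ List.replicate buf.length "" ++ [pvStripMarker raw]) [] by
        simp [pvBLoop, hc]]
      rw [ih _ [] (by simp)]
      simp only [List.nil_append, hc, if_pos]
      simp [pvALoop, hc, List.append_assoc]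
    · by_cases hblank : PySem.Str.strip raw = ""
      · have hbC := blank_toList hblank
        have hb2 : ∀ x ∈ buf ++ [raw], PySem.Str.strip x = "" := by
          intro x hx
          rcases List.mem_append.1 hx with h | h
          · exact hb x h
          · simp at h; subst h; exact hblank
        rw [show pvBLoop (raw :: tl) comments buf = pvBLoop tl comments (buf ++ [raw]) by
          simp [pvBLoop, hc, hbC, startswith_nil_hash, hblank]]
        rw [ih comments (buf ++ [raw]) hb2]
        rw [aLoop_blank_prefix (buf ++ [raw]) tl comments hb2]
        simp only [pvLookahead, hblank, if_pos]
        match h : pvLookahead tl with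
        | none => simp
        | some nb =>
          by_cases hc2 : PySem.Chars.startswith (PySem.Chars.strip nb.toList) ['#'] = true
          · simp [pvALoop, hbC, hblank, h, hc2, startswith_nil_hash, List.append_assoc, List.replicate_succ']
          · simp [hc2]
      · rw [show pvLookahead (raw :: tl) = some raw by simp [pvLookahead, hblank]]
        simp [pvBLoop, hc, hblank]

-- ===== VERDICT (by name: the statement is the Claim_ definition above) =====
theorem split_comment_code_py_spec : Claim_equal_split_comment_code_py := by
  intro lines _
  unfold Spec_split_comment_code_py split_comment_code_py split_comment_code_py_alt
  rw [bLoop_eq_aLoop lines [] [] (by simp)]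
  rfl
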